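-- pv_equiv track=rewrite | github.com/FakeShravann/RespawnApp | backend/logic/gameEngine.py | xp_required_for_level
-- ===== SOURCE A (Python) =====
-- BASE_XP = 100        # XP needed to reach level 2
--
-- XP_INCREMENT = 40    # Extra XP added per new level
--
-- def xp_required_for_level(target_level):
--     """
--     Returns total XP required to reach the given level.
--     Level 1 -> 0 XP
--     Level 2 -> 100 XP
--     Level 3 -> 240 XP
--     Level 4 -> 420 XP
--     """
--
--     if target_level <= 1:
--         return 0
--
--     total_xp = 0
--     increment = BASE_XP
--
--     for level in range(2, target_level + 1):
--         total_xp += increment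
--         increment += XP_INCREMENT
--
--     return total_xp
-- ===== SOURCE B (Python) =====
-- BASE_XP = 100
-- XP_INCREMENT = 40
--
-- def xp_required_for_level(target_level):
--     # Closed-form arithmetic series: n = target_level - 1 levels gained,
--     # sum_{k=0}^{n-1} (BASE_XP + k*XP_INCREMENT) = n*BASE_XP + XP_INCREMENT*n*(n-1)//2
--     n = target_level - 1
--     if n <= 0:
--         return 0
--     return n * BASE_XP + XP_INCREMENT * n * (n - 1) // 2
-- ===== Notes on version B (the rewrite author's own statement) =====
-- stated objective: faster
-- what changed: Replaced the O(n) accumulation loop with the closed-form arithmetic-series sum n*BASE_XP + XP_INCREMENT*n*(n-1)//2.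
import Mathlib
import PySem

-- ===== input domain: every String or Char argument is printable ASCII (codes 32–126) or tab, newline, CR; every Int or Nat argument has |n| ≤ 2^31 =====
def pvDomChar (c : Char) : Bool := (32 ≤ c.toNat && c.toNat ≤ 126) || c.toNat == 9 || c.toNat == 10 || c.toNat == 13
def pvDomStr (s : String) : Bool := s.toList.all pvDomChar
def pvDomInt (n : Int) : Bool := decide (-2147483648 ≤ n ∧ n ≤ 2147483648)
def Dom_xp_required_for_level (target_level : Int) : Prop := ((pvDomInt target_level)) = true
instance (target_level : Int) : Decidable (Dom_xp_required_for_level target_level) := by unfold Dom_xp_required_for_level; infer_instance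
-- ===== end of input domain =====

-- B replaces A's accumulation loop by the closed-form arithmetic-series sum (objective: faster).

-- ===== PORT A =====
def xp_required_for_level (target_level : Int) : Int :=
  if target_level ≤ 1 then 0
  else
    -- total_xp = 0; increment = BASE_XP; for level in range(2, target_level+1): …
    ((PySem.List.pyRange 2 (target_level + 1) 1).foldl
      (fun (st : Int × Int) _level => (st.1 + st.2, st.2 + 40)) (0, 100)).1

-- ===== PORT B =====
def xp_required_for_level_alt (target_level : Int) : Int :=
  let n := target_level - 1
  if n ≤ 0 then 0
  else n * 100 + PySem.Int.floordiv (40 * n * (n - 1)) 2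

-- ===== PRECONDITION & SPEC =====
def Spec_xp_required_for_level (target_level : Int) (out : Int) : Prop := out = xp_required_for_level_alt target_level
instance (target_level : Int) (out : Int) : Decidable (Spec_xp_required_for_level target_level out) := by unfold Spec_xp_required_for_level; infer_instance

-- ===== CLAIM (what is proved, stated in full; the proofs are below) =====
def Claim_equal_xp_required_for_level : Prop := ∀ (target_level : Int), Dom_xp_required_for_level target_level → Spec_xp_required_for_level target_level (xp_required_for_level target_level)

-- ===== LEMMAS AND PROOFS =====

theorem xp_loop_value (n : Nat) (a tot inc : Int) :
    ((PySem.List.pyRange a (a + n) 1).foldl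
      (fun (st : Int × Int) _level => (st.1 + st.2, st.2 + 40)) (tot, inc))
    = (tot + n * inc + 20 * n * (n - 1), inc + 40 * n) := by
  induction n generalizing tot inc with
  | zero => simp [PySem.List.pyRange_one_eq_nil]
  | succ m ih =>
    have h : a + ((m : Int) + 1) = (a + m) + 1 := by ring
    push_cast
    rw [h, PySem.List.pyRange_one_succ_right (by omega), List.foldl_append, ih]
    simp only [List.foldl_cons, List.foldl_nil]
    simp only [Prod.mk.injEq]
    constructor <;> push_cast <;> ring

theorem xp_required_for_level_eq (t : Int) :
    xp_required_for_level t = xp_required_for_level_alt t := by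
  unfold xp_required_for_level xp_required_for_level_alt
  by_cases h : t ≤ 1
  · simp [h, show t - 1 ≤ 0 by omega]
  · have hn : t + 1 = 2 + ((t - 1).toNat : Int) := by omega
    rw [hn, xp_loop_value]
    have h2 : ¬ t - 1 ≤ 0 := by omega
    simp only [h, if_false, h2]
    have hfd : PySem.Int.floordiv (40 * (t - 1) * (t - 1 - 1)) 2
        = 20 * (t - 1) * (t - 2) := by
      have : 40 * (t - 1) * (t - 1 - 1) = (20 * (t - 1) * (t - 2)) * 2 := by ring
      rw [this, PySem.Int.floordiv, Int.mul_fdiv_cancel _ (by norm_num)]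
    rw [hfd]
    have ht : ((t - 1).toNat : Int) = t - 1 := by omega
    rw [ht]; ring

-- ===== VERDICT (by name: the statement is the Claim_ definition above) =====
theorem xp_required_for_level_spec : Claim_equal_xp_required_for_level := by
  intro t _
  unfold Spec_xp_required_for_level
  exact xp_required_for_level_eq t
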